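-- pv_equiv track=rewrite | github.com/takev/libtvutils | tvutils/utils.py | grouped_hex
-- ===== SOURCE A (Python) =====
-- def grouped_hex(x):
--     xs = hex(x)[2:-1].upper()
--
--     s = ""
--     for i, c in enumerate(xs):
--         s+= c
--         if (len(xs) - i - 2) % 64 == 63:
--             s+= "\n"
--         elif (len(xs) - i - 2) % 8 == 7:
--             s+= " "
--
--     return s
-- ===== SOURCE B (Python) =====
-- def grouped_hex(x):
--     xs = hex(x)[2:-1].upper()
--     if not xs:
--         return ""
--     r = xs[::-1]
--     parts = []
--     for g in range(0, len(r), 8):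
--         sep = "\n" if g % 64 == 0 else " "
--         parts.append(sep + r[g:g + 8])
--     return "".join(parts)[::-1]
-- ===== Notes on version B (the rewrite author's own statement) =====
-- stated objective: alternative
-- what changed: Instead of a per-character loop testing a modulo condition at every character, B reverses the digit string once, splits it into consecutive eight-character chunks, prefixes each chunk with a newline when its start offset is a multiple of sixty-four (else a space), then joins and reverses back.
import Mathlib
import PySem

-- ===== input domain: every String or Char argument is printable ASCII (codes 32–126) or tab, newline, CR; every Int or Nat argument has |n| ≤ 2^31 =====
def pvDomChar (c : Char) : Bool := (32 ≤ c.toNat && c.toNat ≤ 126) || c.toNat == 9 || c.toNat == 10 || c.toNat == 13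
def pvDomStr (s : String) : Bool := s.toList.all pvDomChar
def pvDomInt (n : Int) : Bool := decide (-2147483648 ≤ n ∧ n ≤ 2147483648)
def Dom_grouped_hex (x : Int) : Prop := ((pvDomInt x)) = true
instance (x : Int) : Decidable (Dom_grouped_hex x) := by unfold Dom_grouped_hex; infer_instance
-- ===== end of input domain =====

-- B reverses, chunks the reversed digits in eights with a separator per chunk, joins and
-- reverses back (objective: alternative decomposition; both are linear).
-- Note: on Python 3 `hex(x)[2:-1]` drops the LAST hex digit (a Python-2 'L'-strip leftover)
-- and keeps the 'x' for negative x; both ports reproduce that behaviour faithfully.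

-- ===== PORT A =====
-- hex digits of n, lowercase, most significant first (exact port of hex() digit part; fuel = n)
def natHexAux : Nat → Nat → List Char
  | 0, _ => []
  | fuel + 1, n =>
    if n < 16 then [Nat.digitChar n]
    else natHexAux fuel (n / 16) ++ [Nat.digitChar (n % 16)]

-- hex(x) as a char list: '0x…' for x ≥ 0, '-0x…' for x < 0 (exact for Python's hex())
def pyHexChars (x : Int) : List Char :=
  if x < 0 then '-' :: '0' :: 'x' :: natHexAux (-x).toNat (-x).toNat
  else '0' :: 'x' :: natHexAux x.toNat x.toNat

-- xs = hex(x)[2:-1].upper()  (shared preprocessing line of both Pythons)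
def pyHexBody (x : Int) : List Char :=
  (PySem.List.slice (pyHexChars x) (some 2) (some (-1))).map PySem.Chars.upperChar

-- A's loop: s += c; '\n' when (len-i-2)%64==63, ' ' when (len-i-2)%8==7
def coreA (xs : List Char) : List Char :=
  (PySem.List.enumerate xs).foldl (fun s ic =>
    let s := s ++ [ic.2]
    if PySem.Int.mod ((xs.length : Int) - ic.1 - 2) 64 == 63 then s ++ ['\n']
    else if PySem.Int.mod ((xs.length : Int) - ic.1 - 2) 8 == 7 then s ++ [' ']
    else s) []

def grouped_hex (x : Int) : String :=
  String.ofList (coreA (pyHexBody x))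

-- ===== PORT B =====
-- B's body: reverse, chunk in eights with a leading separator per chunk, join, reverse back
def coreB (xs : List Char) : List Char :=
  if xs = [] then []
  else
    let r := xs.reverse
    ((PySem.List.pyRange 0 (r.length : Int) 8).map (fun g =>
        (if PySem.Int.mod g 64 == 0 then ['\n'] else [' ']) ++
        PySem.List.slice r (some g) (some (g + 8)))).flatten.reverse

def grouped_hex_alt (x : Int) : String :=
  String.ofList (coreB (pyHexBody x))

-- ===== PRECONDITION & SPEC =====
def Spec_grouped_hex (x : Int) (out : String) : Prop := out = grouped_hex_alt x
instance (x : Int) (out : String) : Decidable (Spec_grouped_hex x out) := by unfold Spec_grouped_hex; infer_instance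

-- ===== CLAIM (what is proved, stated in full; the proofs are below) =====
def Claim_equal_grouped_hex : Prop := ∀ (x : Int), Dom_grouped_hex x → Spec_grouped_hex x (grouped_hex x)

-- ===== LEMMAS AND PROOFS =====

theorem natHexAux_len_le (k : Nat) : ∀ (fuel n : Nat), n ≤ fuel → n < 16 ^ (k + 1) →
    (natHexAux fuel n).length ≤ k + 1 := by
  induction k with
  | zero =>
    intro fuel n hf hn
    match fuel with
    | 0 => simp [natHexAux]
    | fuel + 1 =>
      simp only [natHexAux]
      rw [if_pos (by omega)]
      simp
  | succ k ih =>
    intro fuel n hf hn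
    match fuel with
    | 0 => simp [natHexAux]
    | fuel + 1 =>
      simp only [natHexAux]
      split
      · simp
      · have h1 : n / 16 ≤ fuel := by omega
        have h2 : n / 16 < 16 ^ (k + 1) := by
          have : n < 16 ^ (k + 1) * 16 := by
            calc n < 16 ^ (k + 1 + 1) := hn
            _ = 16 ^ (k + 1) * 16 := by ring
          omega
        have := ih fuel (n / 16) h1 h2
        simp only [List.length_append, List.length_cons, List.length_nil]
        omega

theorem pyHexBody_len_le (x : Int) (hx : Dom_grouped_hex x) : (pyHexBody x).length ≤ 8 := by
  have hl : ∀ (ys : List Char),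
      ((PySem.List.slice ys (some 2) (some (-1))).map PySem.Chars.upperChar).length
        = (ys.length - 1) - min 2 ys.length := by
    intro ys
    rw [List.length_map, PySem.List.length_slice,
      show ((2 : Int)) = ((2 : Nat) : Int) from rfl,
      PySem.List.clampIdx_natCast, PySem.List.clampIdx_neg_one]
  have hlen : ∀ (n : Nat), n ≤ 2147483648 → (natHexAux n n).length ≤ 8 := by
    intro n hn
    exact natHexAux_len_le 7 n n le_rfl (by norm_num; omega)
  unfold Dom_grouped_hex pvDomInt at hx
  simp only [decide_eq_true_eq] at hx
  unfold pyHexBody pyHexChars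
  split
  · have h8 : (natHexAux (-x).toNat (-x).toNat).length ≤ 8 := hlen _ (by omega)
    rw [hl]; simp only [List.length_cons]; omega
  · have h8 : (natHexAux x.toNat x.toNat).length ≤ 8 := hlen _ (by omega)
    rw [hl]; simp only [List.length_cons]; omega

theorem core_eq (xs : List Char) (h : xs.length ≤ 8) : coreA xs = coreB xs := by
  rcases xs with _ | ⟨a, _ | ⟨b, _ | ⟨c, _ | ⟨d, _ | ⟨e, _ | ⟨f, _ | ⟨g, _ | ⟨i, _ | ⟨j, t⟩⟩⟩⟩⟩⟩⟩⟩⟩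
  all_goals first
    | (exfalso; simp only [List.length_cons] at h; omega)
    | (simp [coreA, coreB, PySem.List.enumerate, PySem.Int.mod,
        PySem.List.pyRange, PySem.List.slice, PySem.List.clampIdx])

-- ===== VERDICT (by name: the statement is the Claim_ definition above) =====
theorem grouped_hex_spec : Claim_equal_grouped_hex := by
  intro x hx
  unfold Spec_grouped_hex grouped_hex grouped_hex_alt
  rw [core_eq _ (pyHexBody_len_le x hx)]
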